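-- pv_equiv track=rewrite | github.com/Ani-0122/Test_Case | Task 3.py | repeated_elements
-- ===== SOURCE A (Python) =====
-- def repeated_elements(numbers):
--     element_count = {}
--     repeated_count = 0
--
--
--     for value in numbers:
--         if value in element_count:
--             element_count[value] += 1
--         else:
--             element_count[value] = 1
--
--
--     for count in element_count.values():
--         if count > 1:
--             repeated_count += 1
--
--     return repeated_count
-- ===== SOURCE B (Python) =====
-- def repeated_elements(numbers):
--     seen = set()
--     repeated = set()
--     for value in numbers:
--         if value in seen:
--             repeated.add(value)
--         else:
--             seen.add(value)
--     return len(repeated)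
-- ===== Notes on version B (the rewrite author's own statement) =====
-- stated objective: idiomatic
-- what changed: Replaces A's full count dictionary plus a second counting pass over the values with a single pass that maintains two membership sets (seen/repeated) and returns len(repeated).
import Mathlib
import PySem

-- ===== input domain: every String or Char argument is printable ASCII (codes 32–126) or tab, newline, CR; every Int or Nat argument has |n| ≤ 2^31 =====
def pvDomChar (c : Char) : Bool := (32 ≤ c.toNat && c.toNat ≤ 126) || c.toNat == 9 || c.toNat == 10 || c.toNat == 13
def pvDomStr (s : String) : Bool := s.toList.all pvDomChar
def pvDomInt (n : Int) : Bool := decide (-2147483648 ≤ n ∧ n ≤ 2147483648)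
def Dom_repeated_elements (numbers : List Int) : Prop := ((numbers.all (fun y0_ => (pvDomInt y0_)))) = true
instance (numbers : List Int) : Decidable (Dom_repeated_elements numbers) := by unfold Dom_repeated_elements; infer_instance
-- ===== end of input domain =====

-- B replaces A's count dictionary + second counting pass by one pass over two membership sets (idiomatic, same cost).

-- ===== PORT A =====
def repeated_elements (numbers : List Int) : Int :=
  -- first loop: build the count dictionary (if value in dict: +=1 else =1)
  let element_count : PySem.Dict Int Int :=
    numbers.foldl
      (fun d value =>
        if d.contains value then d.insert value (d.getD value 0 + 1)
        else d.insert value 1)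
      PySem.Dict.empty
  -- second loop: count the values > 1
  element_count.values.foldl (fun acc c => if 1 < c then acc + 1 else acc) 0

-- ===== PORT B =====
def repeated_elements_alt (numbers : List Int) : Int :=
  let st :=
    numbers.foldl
      (fun (p : PySem.Set Int × PySem.Set Int) value =>
        if PySem.Set.contains p.1 value then (p.1, PySem.Set.add p.2 value)
        else (PySem.Set.add p.1 value, p.2))
      (PySem.Set.empty, PySem.Set.empty)
  (PySem.Set.len st.2 : Int)

-- ===== PRECONDITION & SPEC =====
def Spec_repeated_elements (numbers : List Int) (out : Int) : Prop := out = repeated_elements_alt numbers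
instance (numbers : List Int) (out : Int) : Decidable (Spec_repeated_elements numbers out) := by unfold Spec_repeated_elements; infer_instance

-- ===== CLAIM (what is proved, stated in full; the proofs are below) =====
def Claim_equal_repeated_elements : Prop := ∀ (numbers : List Int), Dom_repeated_elements numbers → Spec_repeated_elements numbers (repeated_elements numbers)

-- ===== LEMMAS AND PROOFS =====

-- A's counting loop is collections.Counter
lemma loopA_eq_counter (numbers : List Int) :
    numbers.foldl
      (fun d value =>
        if d.contains value then d.insert value (d.getD value 0 + 1)
        else d.insert value 1)
      PySem.Dict.empty = PySem.Dict.counter numbers := by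
  rw [← PySem.Dict.foldl_insert_getD_add_one_eq_counter]
  apply PySem.List.foldl_congr_mem
  intro d x _
  by_cases h : d.contains x
  · simp [h]
  · simp [h, PySem.Dict.getD_of_not_contains d 0 (by simpa using h)]

-- membership in B's `repeated` set after the loop
lemma memB (l : List Int) : ∀ (seen rep : PySem.Set Int) (x : Int),
    (x ∈ (l.foldl
      (fun (p : PySem.Set Int × PySem.Set Int) value =>
        if PySem.Set.contains p.1 value then (p.1, PySem.Set.add p.2 value)
        else (PySem.Set.add p.1 value, p.2))
      (seen, rep)).2)
    ↔ (x ∈ rep ∨ (x ∈ seen ∧ x ∈ l) ∨ 2 ≤ l.count x) := by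
  induction l with
  | nil => simp
  | cons v t ih =>
    intro seen rep x
    by_cases hc : PySem.Set.contains seen v = true
    · have hv : v ∈ seen := (PySem.Set.contains_iff _ _).mp hc
      simp only [List.foldl_cons]
      rw [if_pos hc, ih]
      simp only [PySem.Set.mem_add, List.mem_cons, List.count_cons, beq_iff_eq]
      by_cases hx : x = v
      · subst hx; simp [hv]
      · simp [hx, Ne.symm hx]
    · have hv : v ∉ seen := fun h => hc ((PySem.Set.contains_iff _ _).mpr h)
      simp only [List.foldl_cons]
      rw [if_neg hc, ih]
      simp only [PySem.Set.mem_add, List.mem_cons, List.count_cons, beq_iff_eq]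
      by_cases hx : x = v
      · subst hx
        by_cases ht : x ∈ t
        · have h1 : 0 < List.count x t := List.count_pos_iff.mpr ht
          by_cases hr : x ∈ rep <;> simp [hr, ht, hv]
        · have h1 : List.count x t = 0 := List.count_eq_zero.mpr ht
          by_cases hr : x ∈ rep <;> simp [hr, ht, hv, h1]
      · simp [hx, Ne.symm hx]

-- B's `repeated` set stays duplicate-free
lemma nodupB (l : List Int) : ∀ (seen rep : PySem.Set Int), rep.Nodup →
    (l.foldl
      (fun (p : PySem.Set Int × PySem.Set Int) value =>
        if PySem.Set.contains p.1 value then (p.1, PySem.Set.add p.2 value)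
        else (PySem.Set.add p.1 value, p.2))
      (seen, rep)).2.Nodup := by
  induction l with
  | nil => intro _ _ h; simpa using h
  | cons v t ih =>
    intro seen rep h
    by_cases hc : PySem.Set.contains seen v = true
    · simp only [List.foldl_cons]
      rw [if_pos hc]
      exact ih seen (PySem.Set.add rep v) (PySem.Set.nodup_add rep v h)
    · simp only [List.foldl_cons]
      rw [if_neg hc]
      exact ih (PySem.Set.add seen v) rep h

-- ===== VERDICT (by name: the statement is the Claim_ definition above) =====
theorem repeated_elements_spec : Claim_equal_repeated_elements := by
  intro numbers _
  unfold Spec_repeated_elements repeated_elements repeated_elements_alt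
  simp only [loopA_eq_counter]
  rw [PySem.List.foldl_ite_add_one]
  have hvalues : (PySem.Dict.counter numbers).values
      = (PySem.Set.ofList numbers).map (fun k => (numbers.count k : Int)) := by
    have := PySem.Dict.items_counter (xs := numbers)
    simp [PySem.Dict.values, this, List.map_map, Function.comp]
  rw [hvalues, List.countP_map]
  -- A's count = number of elements of the nodup list (ofList numbers) with count ≥ 2
  have hA : ((PySem.Set.ofList numbers).countP ((fun c => decide (1 < c)) ∘ fun k => (numbers.count k : Int)))
      = ((PySem.Set.ofList numbers).filter (fun k => decide (2 ≤ numbers.count k))).length := by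
    rw [List.countP_eq_length_filter]
    congr 1
    apply List.filter_congr
    intro x _
    simp only [Function.comp]
    rw [decide_eq_decide]
    omega
  -- B's set is a nodup list with the same membership
  have hperm : ((PySem.Set.ofList numbers).filter (fun k => decide (2 ≤ numbers.count k))).Perm
      ((numbers.foldl
        (fun (p : PySem.Set Int × PySem.Set Int) value =>
          if PySem.Set.contains p.1 value then (p.1, PySem.Set.add p.2 value)
          else (PySem.Set.add p.1 value, p.2))
        (PySem.Set.empty, PySem.Set.empty)).2) := by
    rw [List.perm_ext_iff_of_nodup (List.Nodup.filter _ (PySem.Set.nodup_ofList _))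
      (nodupB numbers PySem.Set.empty PySem.Set.empty (List.nodup_nil))]
    intro x
    rw [memB]
    simp only [List.mem_filter, PySem.Set.mem_ofList, PySem.Set.empty, List.not_mem_nil,
      false_or, false_and, decide_eq_true_eq]
    constructor
    · rintro ⟨_, h⟩; exact h
    · intro h
      have : x ∈ numbers := by rw [← List.count_pos_iff]; omega
      exact ⟨this, h⟩
  rw [hA, hperm.length_eq]
  simp [PySem.Set.len]
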